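-- pv_equiv track=rewrite | github.com/Steveineiter/Bachelor_Thesis | Learning from Data/Checklist how often a person liked our post/checklistCreator.py | user_to_liked_posts_count_and_id
-- ===== SOURCE A (Python) =====
-- def user_to_liked_posts_count_and_id(id_of_post_to_post_was_liked_by):
--     # Put names in dict and count it (Person: (counter, id_of_post))
--     user_to_liked_posts_count_and_id = {}
--
--     for id_of_post, post_was_liked_by in id_of_post_to_post_was_liked_by.items():
--         users = [str(user) for user in post_was_liked_by.split(" ")]
--         for user in users:
--             if user in user_to_liked_posts_count_and_id:
--                 user_to_liked_posts_count_and_id[user] = (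
--                     user_to_liked_posts_count_and_id[user][0] + 1,
--                     user_to_liked_posts_count_and_id[user][1] + " " + id_of_post,
--                 )
--             else:
--                 user_to_liked_posts_count_and_id[user] = (1, id_of_post)
--
--     return user_to_liked_posts_count_and_id
-- ===== SOURCE B (Python) =====
-- def user_to_liked_posts_count_and_id(id_of_post_to_post_was_liked_by):
--     # Gather: user -> list of post ids (duplicates and '' tokens kept, like split(" ")).
--     liked_ids = {}
--     for id_of_post, post_was_liked_by in id_of_post_to_post_was_liked_by.items():
--         for user in post_was_liked_by.split(" "):
--             liked_ids.setdefault(user, []).append(id_of_post)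
--     # Finalize: (count, space-joined ids) per user, in first-appearance order.
--     return {user: (len(ids), " ".join(ids)) for user, ids in liked_ids.items()}
-- ===== Notes on version B (the rewrite author's own statement) =====
-- stated objective: alternative
-- what changed: B gathers a dict mapping each user to a list of post ids in one pass and then derives (count, space-joined ids) in a separate finalization pass, instead of A's incremental per-token tuple/string concatenation behind a membership branch.
import Mathlib
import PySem

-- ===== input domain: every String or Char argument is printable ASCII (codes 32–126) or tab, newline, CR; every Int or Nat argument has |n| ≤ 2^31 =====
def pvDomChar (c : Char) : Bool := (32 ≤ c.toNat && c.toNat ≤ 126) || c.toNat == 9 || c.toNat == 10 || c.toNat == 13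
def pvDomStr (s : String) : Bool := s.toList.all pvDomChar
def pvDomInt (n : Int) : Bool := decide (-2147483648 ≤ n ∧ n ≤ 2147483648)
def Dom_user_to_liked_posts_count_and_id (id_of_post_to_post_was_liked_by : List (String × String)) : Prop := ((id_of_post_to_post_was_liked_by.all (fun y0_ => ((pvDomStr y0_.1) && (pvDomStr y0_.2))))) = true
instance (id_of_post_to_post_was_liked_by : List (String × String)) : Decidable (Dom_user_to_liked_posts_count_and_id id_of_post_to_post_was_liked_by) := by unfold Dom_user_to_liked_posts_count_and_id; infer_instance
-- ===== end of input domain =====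

-- B replaces A's incremental (count, joined-string) tuple updates behind a membership branch by
-- a user -> list-of-ids gathering pass plus a separate finalization pass (alternative decomposition).

-- ===== PORT A =====
-- body of A's inner loop: branch on membership, update (counter, joined ids) in place
def pvAStep (id_of_post : String) (d : PySem.Dict String (Int × String)) (user : String) :
    PySem.Dict String (Int × String) :=
  if d.contains user then
    let cur := d.getD user (0, "")
    d.insert user (cur.1 + 1, cur.2 ++ " " ++ id_of_post)
  else
    d.insert user (1, id_of_post)

def user_to_liked_posts_count_and_id (id_of_post_to_post_was_liked_by : List (String × String)) : List (String × Int × String) :=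
  (id_of_post_to_post_was_liked_by.foldl
    (fun d p =>
      let users := ((PySem.Str.split? p.2 " ").getD []).map (fun user => user)
      users.foldl (pvAStep p.1) d)
    PySem.Dict.empty).items

-- ===== PORT B =====
-- body of B's gathering loop: liked_ids.setdefault(user, []).append(id_of_post)
def pvBStep (id_of_post : String) (d : PySem.Dict String (List String)) (user : String) :
    PySem.Dict String (List String) :=
  d.modify user [] (· ++ [id_of_post])

-- B's finalization of one entry: user -> (count, space-joined ids)
def pvFin (q : String × List String) : String × Int × String :=
  (q.1, ((q.2.length : Int), PySem.Str.join " " q.2))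

def user_to_liked_posts_count_and_id_alt (id_of_post_to_post_was_liked_by : List (String × String)) : List (String × Int × String) :=
  let liked_ids := id_of_post_to_post_was_liked_by.foldl
    (fun d p => ((PySem.Str.split? p.2 " ").getD []).foldl (pvBStep p.1) d)
    PySem.Dict.empty
  liked_ids.items.map pvFin

-- ===== PRECONDITION & SPEC =====
def Spec_user_to_liked_posts_count_and_id (id_of_post_to_post_was_liked_by : List (String × String)) (out : List (String × Int × String)) : Prop := out = user_to_liked_posts_count_and_id_alt id_of_post_to_post_was_liked_by
instance (id_of_post_to_post_was_liked_by : List (String × String)) (out : List (String × Int × String)) : Decidable (Spec_user_to_liked_posts_count_and_id id_of_post_to_post_was_liked_by out) := by unfold Spec_user_to_liked_posts_count_and_id; infer_instance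

-- ===== CLAIM (what is proved, stated in full; the proofs are below) =====
def Claim_equal_user_to_liked_posts_count_and_id : Prop := ∀ (id_of_post_to_post_was_liked_by : List (String × String)), Dom_user_to_liked_posts_count_and_id id_of_post_to_post_was_liked_by → Spec_user_to_liked_posts_count_and_id id_of_post_to_post_was_liked_by (user_to_liked_posts_count_and_id id_of_post_to_post_was_liked_by)

-- ===== LEMMAS AND PROOFS =====

-- invariant of B's accumulator: keys distinct, every stored id-list nonempty
def pvInv (d : PySem.Dict String (List String)) : Prop :=
  d.keys.Nodup ∧ ∀ q ∈ d.items, q.2 ≠ []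

theorem pvJoin_chars_append (sep q : List Char) (ps : List (List Char)) (h : ps ≠ []) :
    PySem.Chars.join sep (ps ++ [q]) = PySem.Chars.join sep ps ++ sep ++ q := by
  induction ps with
  | nil => exact absurd rfl h
  | cons p rest ih =>
    cases rest with
    | nil => simp [PySem.Chars.join_cons_cons, PySem.Chars.join_singleton]
    | cons p' rest' =>
      simp only [List.cons_append] at ih ⊢
      rw [PySem.Chars.join_cons_cons, ih (by simp), PySem.Chars.join_cons_cons]
      simp [List.append_assoc]

theorem pvJoin_append (ids : List String) (id : String) (h : ids ≠ []) :
    PySem.Str.join " " (ids ++ [id]) = PySem.Str.join " " ids ++ " " ++ id := by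
  apply String.toList_inj.mp
  simp only [PySem.Str.toList_join, String.toList_append, List.map_append, List.map_cons,
    List.map_nil]
  exact pvJoin_chars_append _ _ _ (by simpa using h)

theorem pvJoin_singleton (id : String) : PySem.Str.join " " [id] = id := by
  apply String.toList_inj.mp
  simp [PySem.Str.toList_join, PySem.Chars.join_singleton]

theorem pvKeys_map_fin (d : PySem.Dict String (List String)) :
    (PySem.Dict.mk (d.items.map pvFin)).keys = d.keys := by
  simp [PySem.Dict.keys, pvFin]

theorem pvContains_map_fin (d : PySem.Dict String (List String)) (u : String) :
    (PySem.Dict.mk (d.items.map pvFin)).contains u = d.contains u := by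
  simp [PySem.Dict.contains, List.any_map, Function.comp_def, pvFin]

-- one token: A's update of the finalized dict equals finalizing B's update
theorem pvStep_comm (d : PySem.Dict String (List String)) (u id : String) (hInv : pvInv d) :
    pvAStep id (PySem.Dict.mk (d.items.map pvFin)) u
      = PySem.Dict.mk ((pvBStep id d u).items.map pvFin) := by
  obtain ⟨hnd, hne⟩ := hInv
  have hndA : (PySem.Dict.mk (d.items.map pvFin)).keys.Nodup := by
    rw [pvKeys_map_fin]; exact hnd
  by_cases hc : d.contains u = true
  · -- u already present with nonempty list ids
    obtain ⟨ids, hget⟩ : ∃ ids, d.get? u = some ids := by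
      have := (PySem.Dict.contains_eq_isSome_get? d u) ▸ hc
      exact Option.isSome_iff_exists.mp this
    have hmem : (u, ids) ∈ d.items := PySem.Dict.mem_items_of_get?_eq_some _ hget
    have hids_ne : ids ≠ [] := hne _ hmem
    have hmemA : (u, pvFin (u, ids) |>.2) ∈ (PySem.Dict.mk (d.items.map pvFin)).items := by
      simpa [pvFin] using List.mem_map_of_mem (f := pvFin) hmem
    have hgetA : (PySem.Dict.mk (d.items.map pvFin)).getD u (0, "")
        = ((ids.length : Int), PySem.Str.join " " ids) := by
      have := PySem.Dict.getD_of_mem_items _ hmemA hndA (0, "")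
      simpa [pvFin] using this
    have hgetB : d.getD u [] = ids := PySem.Dict.getD_of_get?_eq_some _ _ hget
    have hcA : (PySem.Dict.mk (d.items.map pvFin)).contains u = true := by
      rw [pvContains_map_fin]; exact hc
    rw [pvAStep, if_pos hcA, pvBStep, PySem.Dict.modify, hgetB]
    apply PySem.Dict.ext
    rw [PySem.Dict.items_insert_of_contains _ _ hcA,
      PySem.Dict.items_insert_of_contains _ _ hc]
    simp only [List.map_map]
    apply List.map_congr_left
    intro q hq
    by_cases hqu : q.1 = u
    · have : d.get? q.1 = some q.2 := by
        apply PySem.Dict.get?_of_mem_items _ hq hnd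
      have hq2 : q.2 = ids := by
        rw [hqu, hget] at this; exact (Option.some_inj.mp this).symm
      simp only [Function.comp_apply, hqu, beq_self_eq_true, if_pos, hgetA, pvFin, hq2]
      have hj := pvJoin_append ids id hids_ne
      simp [hj]
    · simp [Function.comp, pvFin, hqu]
  · -- u fresh: both append
    have hcB : d.contains u = false := by simpa using hc
    have hcA : (PySem.Dict.mk (d.items.map pvFin)).contains u = false := by
      rw [pvContains_map_fin]; exact hcB
    rw [pvAStep, if_neg (by simp [hcA]), pvBStep, PySem.Dict.modify,
      PySem.Dict.getD_of_not_contains _ _ hcB]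
    apply PySem.Dict.ext
    rw [PySem.Dict.items_insert_of_not_contains _ _ hcA,
      PySem.Dict.items_insert_of_not_contains _ _ hcB]
    simp [pvFin, pvJoin_singleton]

theorem pvInv_step (d : PySem.Dict String (List String)) (u id : String) (hInv : pvInv d) :
    pvInv (pvBStep id d u) := by
  obtain ⟨hnd, hne⟩ := hInv
  constructor
  · rw [pvBStep, PySem.Dict.modify]
    exact PySem.Dict.nodup_keys_insert _ _ _ hnd
  · intro q hq
    rw [pvBStep, PySem.Dict.modify] at hq
    rcases (PySem.Dict.mem_items_insert _ _ _ _).mp hq with h | h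
    · subst h; simp
    · exact hne _ h.1

-- the inner token loop commutes with finalization
theorem pvInner_comm (users : List String) (id : String) (d : PySem.Dict String (List String))
    (hInv : pvInv d) :
    (users.map (fun user => user)).foldl (pvAStep id) (PySem.Dict.mk (d.items.map pvFin))
      = PySem.Dict.mk ((users.foldl (pvBStep id) d).items.map pvFin) := by
  rw [List.map_id']
  induction users generalizing d with
  | nil => rfl
  | cons u rest ih =>
    simp only [List.foldl_cons]
    rw [pvStep_comm d u id hInv]
    exact ih _ (pvInv_step d u id hInv)

theorem pvInv_inner (users : List String) (id : String) (d : PySem.Dict String (List String))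
    (hInv : pvInv d) : pvInv (users.foldl (pvBStep id) d) := by
  induction users generalizing d with
  | nil => exact hInv
  | cons u rest ih => exact ih _ (pvInv_step d u id hInv)

-- the outer loop commutes with finalization
theorem pvOuter_comm (pairs : List (String × String)) (d : PySem.Dict String (List String))
    (hInv : pvInv d) :
    pairs.foldl
        (fun d p =>
          (((PySem.Str.split? p.2 " ").getD []).map (fun user => user)).foldl (pvAStep p.1) d)
        (PySem.Dict.mk (d.items.map pvFin))
      = PySem.Dict.mk
          ((pairs.foldl (fun d p => ((PySem.Str.split? p.2 " ").getD []).foldl (pvBStep p.1) d)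
            d).items.map pvFin) := by
  induction pairs generalizing d with
  | nil => rfl
  | cons p rest ih =>
    simp only [List.foldl_cons]
    rw [pvInner_comm _ _ _ hInv]
    exact ih _ (pvInv_inner _ _ _ hInv)

-- ===== VERDICT (by name: the statement is the Claim_ definition above) =====
theorem user_to_liked_posts_count_and_id_spec : Claim_equal_user_to_liked_posts_count_and_id := by
  intro pairs _
  unfold Spec_user_to_liked_posts_count_and_id user_to_liked_posts_count_and_id
    user_to_liked_posts_count_and_id_alt
  have h := pvOuter_comm pairs PySem.Dict.empty ⟨by simp [PySem.Dict.keys, PySem.Dict.empty], by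
    intro q hq; simp [PySem.Dict.empty] at hq⟩
  have hempty : PySem.Dict.mk ((PySem.Dict.empty : PySem.Dict String (List String)).items.map pvFin)
      = (PySem.Dict.empty : PySem.Dict String (Int × String)) := rfl
  rw [hempty] at h
  rw [h]
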